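-- pv_equiv track=rewrite | github.com/whyj107/CodeWar | 20220412_Dropcaps.py | drop_cap
-- ===== SOURCE A (Python) =====
-- def drop_cap(str_):
--     tmp = ''
--     result = ''
--     for s in str_:
--         if s != ' ':
--             tmp += s
--         else:
--             result += (tmp.capitalize() if len(tmp)>2 else tmp) + s
--             tmp = ''
--     return result + (tmp.capitalize() if len(tmp)>2 else tmp)
-- ===== SOURCE B (Python) =====
-- def drop_cap(str_):
--     return ' '.join(w.capitalize() if len(w) > 2 else w for w in str_.split(' '))
-- ===== Notes on version B (the rewrite author's own statement) =====
-- stated objective: idiomatic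
-- what changed: Replaces A's char-by-char loop with a manual token accumulator and flush of leftover state by a single split/map/join expression over space-separated tokens.
import Mathlib
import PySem

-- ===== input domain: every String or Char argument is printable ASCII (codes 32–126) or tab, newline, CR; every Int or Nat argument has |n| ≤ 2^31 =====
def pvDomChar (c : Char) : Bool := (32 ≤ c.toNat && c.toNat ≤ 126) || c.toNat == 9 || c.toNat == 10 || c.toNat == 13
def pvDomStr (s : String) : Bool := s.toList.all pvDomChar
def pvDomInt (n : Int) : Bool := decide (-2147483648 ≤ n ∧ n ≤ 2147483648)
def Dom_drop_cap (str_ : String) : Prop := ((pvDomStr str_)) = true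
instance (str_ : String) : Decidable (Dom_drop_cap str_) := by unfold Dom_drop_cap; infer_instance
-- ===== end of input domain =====

-- B replaces A's char-by-char accumulator loop by an idiomatic split(' ')/map/join over word tokens.


-- str.capitalize(): first char title-cased, the rest lower-cased.
-- Exact on the ASCII domain, where title-casing a char = PySem.Chars.upperChar.
def pyCapitalize : List Char → List Char
  | [] => []
  | c :: rest => PySem.Chars.upperChar c :: rest.map PySem.Chars.lowerChar

-- ===== PORT A =====
-- state = (tmp, result); the loop body follows A's branches in order.
def drop_cap (str_ : String) : String :=
  let p := str_.toList.foldl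
    (fun (st : List Char × List Char) s =>
      if s ≠ ' ' then (st.1 ++ [s], st.2)
      else ([], st.2 ++ (if 2 < st.1.length then pyCapitalize st.1 else st.1) ++ [s]))
    ([], [])
  String.ofList (p.2 ++ (if 2 < p.1.length then pyCapitalize p.1 else p.1))

-- ===== PORT B =====
def drop_cap_alt (str_ : String) : String :=
  String.ofList (PySem.Chars.join [' ']
    ((PySem.Chars.splitOn str_.toList [' ']).map
      (fun w => if 2 < w.length then pyCapitalize w else w)))

-- ===== PRECONDITION & SPEC =====
def Spec_drop_cap (str_ : String) (out : String) : Prop := out = drop_cap_alt str_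
instance (str_ : String) (out : String) : Decidable (Spec_drop_cap str_ out) := by unfold Spec_drop_cap; infer_instance

-- ===== CLAIM (what is proved, stated in full; the proofs are below) =====
def Claim_equal_drop_cap : Prop := ∀ (str_ : String), Dom_drop_cap str_ → Spec_drop_cap str_ (drop_cap str_)

-- ===== LEMMAS AND PROOFS =====

-- A simple structural recursion computing split(' ') (proved equal to PySem.Chars.splitOn below).
def mySplit : List Char → List (List Char)
  | [] => [[]]
  | c :: rest =>
    if c = ' ' then [] :: mySplit rest
    else match mySplit rest with
      | [] => [[c]]
      | w :: ws => (c :: w) :: ws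

theorem mySplit_ne_nil (l : List Char) : mySplit l ≠ [] := by
  cases l with
  | nil => simp [mySplit]
  | cons c rest =>
    simp only [mySplit]
    split
    · simp
    · split <;> simp

-- prepend a prefix onto the first token
def consHead (pre : List Char) : List (List Char) → List (List Char)
  | [] => [pre]
  | w :: ws => (pre ++ w) :: ws

theorem go_eq (fuel : Nat) (l cur : List Char) (acc : List (List Char))
    (h : l.length < fuel) :
    PySem.Chars.splitOn.go [' '] fuel l cur acc
      = acc.reverse ++ consHead cur.reverse (mySplit l) := by
  induction fuel generalizing l cur acc with
  | zero => omega
  | succ fuel ih =>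
    cases l with
    | nil =>
      simp [PySem.Chars.splitOn.go, mySplit, consHead]
    | cons c rest =>
      simp only [PySem.Chars.splitOn.go]
      by_cases hc : c = ' '
      · subst hc
        have hpre : List.isPrefixOf [' '] (' ' :: rest) = true := by
          simp [List.isPrefixOf]
        rw [if_pos hpre]
        simp only [List.length_cons] at h
        simp only [List.length_singleton, List.drop_succ_cons, List.drop_zero]
        rw [ih rest [] (cur.reverse :: acc) (by omega)]
        have hne := mySplit_ne_nil rest
        cases hms : mySplit rest with
        | nil => exact absurd hms hne
        | cons w ws =>
          simp [mySplit, consHead, hms]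
      · have hpre : List.isPrefixOf [' '] (c :: rest) = false := by
          simp [List.isPrefixOf]
          exact fun hb => hc hb.symm
        rw [if_neg (by simp [hpre])]
        simp only [List.length_cons] at h
        rw [ih rest (c :: cur) acc (by omega)]
        have hne := mySplit_ne_nil rest
        cases hms : mySplit rest with
        | nil => exact absurd hms hne
        | cons w ws =>
          simp [mySplit, consHead, hms, hc]

theorem splitOn_space (l : List Char) :
    PySem.Chars.splitOn l [' '] = mySplit l := by
  unfold PySem.Chars.splitOn
  rw [go_eq _ _ _ _ (by omega)]
  have hne := mySplit_ne_nil l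
  cases hms : mySplit l with
  | nil => exact absurd hms hne
  | cons w ws => simp [consHead]

-- the "capitalize if longer than 2" step shared in shape by both programs
def capA (t : List Char) : List Char := if 2 < t.length then pyCapitalize t else t

theorem foldl_invariant (cs : List Char) : ∀ (tmp res : List Char),
    (let p := cs.foldl
      (fun (st : List Char × List Char) s =>
        if s ≠ ' ' then (st.1 ++ [s], st.2)
        else ([], st.2 ++ (if 2 < st.1.length then pyCapitalize st.1 else st.1) ++ [s]))
      (tmp, res)
     p.2 ++ (if 2 < p.1.length then pyCapitalize p.1 else p.1))
      = res ++ PySem.Chars.join [' '] ((consHead tmp (mySplit cs)).map capA) := by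
  induction cs with
  | nil =>
    intro tmp res
    simp [mySplit, consHead, PySem.Chars.join, List.intercalate, capA]
  | cons c rest ih =>
    intro tmp res
    by_cases hc : c = ' '
    · subst hc
      simp only [List.foldl_cons, if_neg (by simp : ¬ (' ' ≠ ' '))]
      rw [ih [] (res ++ (if 2 < tmp.length then pyCapitalize tmp else tmp) ++ [' '])]
      have hne := mySplit_ne_nil rest
      cases hms : mySplit rest with
      | nil => exact absurd hms hne
      | cons w ws =>
        have h1 : consHead tmp (mySplit (' ' :: rest)) = tmp :: w :: ws := by
          simp [mySplit, hms, consHead]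
        rw [h1]
        simp only [List.map_cons]
        rw [PySem.Chars.join_cons_cons]
        simp [capA, List.append_assoc, consHead]
    · simp only [List.foldl_cons, if_pos (by simpa using hc : (c ≠ ' '))]
      rw [ih (tmp ++ [c]) res]
      have hne := mySplit_ne_nil rest
      cases hms : mySplit rest with
      | nil => exact absurd hms hne
      | cons w ws =>
        simp [mySplit, hms, hc, consHead, List.append_assoc]

-- ===== VERDICT (by name: the statement is the Claim_ definition above) =====
theorem drop_cap_spec : Claim_equal_drop_cap := by
  intro str_ _
  unfold Spec_drop_cap drop_cap drop_cap_alt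
  rw [splitOn_space]
  have h := foldl_invariant str_.toList [] []
  simp only [List.nil_append] at h
  simp only [h]
  have : consHead [] (mySplit str_.toList) = mySplit str_.toList := by
    have hne := mySplit_ne_nil str_.toList
    cases hms : mySplit str_.toList with
    | nil => exact absurd hms hne
    | cons w ws => simp [consHead]
  rw [this]
  rfl
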